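-- pv_equiv track=rewrite | github.com/nqdat2002/Training-Algorithms | ICPC_Training_2023/Contest5/A.py | lamtron
-- ===== SOURCE A (Python) =====
-- def lamtron(s):
--     if len(s) == 1:
--         return s
--     else:
--         a = list(int(x) for x in s)
--         for i in range(len(a)-1, 0 ,-1):
--             if a[i] >= 5:
--                 a[i-1] += 1
--             a[i] = 0
--         if a[0] == 10:
--             a[0] = 0
--             a = [1] + a
--         s = ""
--         for x in a:
--             s += str(x)
--         return s
-- ===== SOURCE B (Python) =====
-- def lamtron(s):
--     if len(s) == 1:
--         return s
--     # A carry propagates into the leading digit iff the first non-'4' character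
--     # of the tail exists and is >= '5' (a run of 4s passes a carry through unchanged).
--     t = s[1:].lstrip('4')
--     lead = int(s[0]) + (1 if t and t[0] >= '5' else 0)
--     if lead == 10:
--         return '1' + '0' * len(s)
--     return str(lead) + '0' * (len(s) - 1)
-- ===== Notes on version B (the rewrite author's own statement) =====
-- stated objective: alternative
-- what changed: Replaces A's arithmetic in-place carry loop over a digit array (increment neighbour, zero each cell, rebuild string char by char) by a character-level rule with no carry propagation at all: strip the leading run of '4's from the tail and look at one character (carry iff it is >= '5'), then build the output directly as the leading digit followed by a run of zeros.
import Mathlib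
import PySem

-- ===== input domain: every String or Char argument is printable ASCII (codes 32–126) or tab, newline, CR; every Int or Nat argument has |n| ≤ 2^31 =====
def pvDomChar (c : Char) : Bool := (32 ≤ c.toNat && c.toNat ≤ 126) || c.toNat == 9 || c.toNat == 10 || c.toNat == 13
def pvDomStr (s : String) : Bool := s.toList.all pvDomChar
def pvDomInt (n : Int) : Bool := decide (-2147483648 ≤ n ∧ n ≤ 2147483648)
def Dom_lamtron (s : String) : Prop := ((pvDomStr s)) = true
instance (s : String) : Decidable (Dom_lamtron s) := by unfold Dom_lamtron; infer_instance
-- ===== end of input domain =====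

-- B replaces A's in-place digit-array carry pass by a character-level rule: the carry into the
-- leading digit is 1 iff the first non-'4' character of the tail is >= '5' (objective: alternative).


-- ===== PORT A =====
-- int(x) for a single character x (Pre_ guarantees the character is a digit for len ≠ 1)
def pvDigit (c : Char) : Int := (PySem.Int.ofStr? (String.ofList [c])).getD 0

-- one iteration of A's loop body at index i (indices are ≥ 1 in the loop, so .toNat is exact)
def lamtronStep (a : List Int) (i : Int) : List Int :=
  let a' := if PySem.List.pyGetD a i 0 ≥ 5
            then a.set (i - 1).toNat (PySem.List.pyGetD a (i - 1) 0 + 1)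
            else a
  a'.set i.toNat 0

def lamtron (s : String) : String :=
  if PySem.Str.len s = 1 then s
  else
    let a := s.toList.map pvDigit
    let a := (PySem.List.pyRange ((a.length : Int) - 1) 0 (-1)).foldl lamtronStep a
    let a := if PySem.List.pyGetD a 0 0 = 10 then 1 :: a.set 0 0 else a
    a.foldl (fun acc x => acc ++ PySem.Int.toStr x) ""

-- ===== PORT B =====
-- `1 if t and t[0] >= '5' else 0` on the stripped tail t
def pvLeadCarry (t : List Char) : Int :=
  match t with
  | [] => 0
  | c :: _ => if '5' ≤ c then 1 else 0

def lamtron_alt (s : String) : String :=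
  if PySem.Str.len s = 1 then s
  else
    -- s[1:].lstrip('4'): dropWhile is exact for a single-character strip set
    let t := (PySem.List.slice s.toList (some 1) none).dropWhile (fun c => c == '4')
    -- int(s[0]): s is nonempty here under Pre_, so headD's default is never used
    let lead := pvDigit (s.toList.headD '0') + pvLeadCarry t
    if lead = 10 then "1" ++ String.ofList (List.replicate (PySem.Str.len s).toNat '0')
    else PySem.Int.toStr lead ++ String.ofList (List.replicate ((PySem.Str.len s).toNat - 1) '0')

-- ===== PRECONDITION & SPEC =====
-- Pre_ excludes exactly the inputs where Python A raises: the empty string (IndexError at a[0])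
-- and strings of length ≥ 2 containing a non-digit character (ValueError in int(x)).
def Pre_lamtron (s : String) : Prop :=
  PySem.Str.len s = 1 ∨ (2 ≤ PySem.Str.len s ∧ s.toList.all PySem.Chars.isdigit = true)
instance (s : String) : Decidable (Pre_lamtron s) := by unfold Pre_lamtron; infer_instance
def pvWitness_lamtron : String := "4729"

def Spec_lamtron (s : String) (out : String) : Prop := out = lamtron_alt s
instance (s : String) (out : String) : Decidable (Spec_lamtron s out) := by unfold Spec_lamtron; infer_instance

-- ===== CLAIM (what is proved, stated in full; the proofs are below) =====
def Claim_equal_lamtron : Prop := ∀ (s : String), Dom_lamtron s → Pre_lamtron s → Spec_lamtron s (lamtron s)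

-- ===== LEMMAS AND PROOFS =====

-- the right-to-left carry chain of A, as a foldr
def pvCarry (l : List Int) : Int := l.foldr (fun d c => if d + c ≥ 5 then 1 else 0) 0

theorem pvCarry_cases (l : List Int) : pvCarry l = 0 ∨ pvCarry l = 1 := by
  cases l with
  | nil => left; rfl
  | cons d l => unfold pvCarry; simp only [List.foldr_cons]; split_ifs <;> simp

theorem digit_enum (c : Char) (h : PySem.Chars.isdigit c = true) :
    c ∈ ['0','1','2','3','4','5','6','7','8','9'] := by
  simp only [PySem.Chars.isdigit, Bool.and_eq_true, decide_eq_true_eq, Char.le_def,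
    UInt32.le_iff_toNat_le] at h
  obtain ⟨h1, h2⟩ := h
  have hc : Char.ofNat c.toNat = c := Char.ofNat_toNat c
  have a1 : 48 ≤ c.toNat := h1
  have a2 : c.toNat ≤ 57 := h2
  rw [← hc]
  interval_cases hv : c.toNat <;> decide

theorem pv_digit_facts (c : Char) (h : PySem.Chars.isdigit c = true) :
    ((c == '4') = true ∧ pvDigit c = 4)
    ∨ ((c == '4') = false ∧ '5' ≤ c ∧ 5 ≤ pvDigit c)
    ∨ ((c == '4') = false ∧ ¬ '5' ≤ c ∧ 0 ≤ pvDigit c ∧ pvDigit c ≤ 3) := by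
  have hm := digit_enum c h
  simp only [List.mem_cons, List.not_mem_nil, or_false] at hm
  rcases hm with rfl|rfl|rfl|rfl|rfl|rfl|rfl|rfl|rfl|rfl <;> decide

-- B's stripped-tail rule computes A's carry chain, for digit characters
theorem pv_char_carry (cs : List Char) (h : ∀ c ∈ cs, PySem.Chars.isdigit c = true) :
    pvLeadCarry (cs.dropWhile (fun c => c == '4')) = pvCarry (cs.map pvDigit) := by
  induction cs with
  | nil => rfl
  | cons c cs ih =>
    have hc := pv_digit_facts c (h c (by simp))
    have ih' := ih (fun d hd => h d (by simp [hd]))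
    rcases hc with ⟨h4, hv⟩ | ⟨h4, h5, hv⟩ | ⟨h4, h5, hv0, hv3⟩
    · simp only [List.dropWhile_cons, h4, if_true, List.map_cons]
      rw [ih']
      unfold pvCarry
      simp only [List.foldr_cons, hv]
      rcases pvCarry_cases (cs.map pvDigit) with h0 | h0 <;>
        (unfold pvCarry at h0; rw [h0]; norm_num)
    · simp only [List.dropWhile_cons, h4, Bool.false_eq_true, if_false, List.map_cons, pvLeadCarry]
      rw [if_pos h5]
      unfold pvCarry
      simp only [List.foldr_cons]
      rcases pvCarry_cases (cs.map pvDigit) with h0 | h0 <;>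
        (unfold pvCarry at h0; rw [h0]; split_ifs <;> omega)
    · simp only [List.dropWhile_cons, h4, Bool.false_eq_true, if_false, List.map_cons, pvLeadCarry]
      rw [if_neg h5]
      unfold pvCarry
      simp only [List.foldr_cons]
      rcases pvCarry_cases (cs.map pvDigit) with h0 | h0 <;>
        (unfold pvCarry at h0; rw [h0]; split_ifs <;> omega)

theorem pv_range_split (n : ℕ) (h : 1 ≤ n) :
    PySem.List.pyRange (n : Int) 0 (-1) = PySem.List.pyRange (n : Int) 1 (-1) ++ [1] := by
  rw [PySem.List.pyRange_neg_one, PySem.List.pyRange_neg_one]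
  have h1 : ((n:Int) - 0).toNat = n := by omega
  have h2 : ((n:Int) - 1).toNat = n - 1 := by omega
  rw [h1, h2]
  obtain ⟨m, rfl⟩ : ∃ m, n = m + 1 := ⟨n - 1, by omega⟩
  rw [List.range_succ]
  simp

theorem pv_range_shift (n : ℕ) :
    PySem.List.pyRange (n : Int) 1 (-1)
      = (PySem.List.pyRange ((n : Int) - 1) 0 (-1)).map (· + 1) := by
  rw [PySem.List.pyRange_neg_one, PySem.List.pyRange_neg_one]
  have h2 : ((n:Int) - 1 - 0).toNat = ((n:Int) - 1).toNat := by omega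
  rw [h2, List.map_map]
  apply List.map_congr_left
  intro k hk
  simp at hk ⊢
  omega

theorem pv_step_shift (x : Int) (t : List Int) (i : Int) (hi : 1 ≤ i) :
    lamtronStep (x :: t) (i + 1) = x :: lamtronStep t i := by
  have g1 : PySem.List.pyGetD (x :: t) (i + 1) 0 = PySem.List.pyGetD t i 0 := by
    rw [PySem.List.pyGetD_of_nonneg _ _ (by omega), PySem.List.pyGetD_of_nonneg _ _ (by omega)]
    have : (i + 1).toNat = i.toNat + 1 := by omega
    rw [this]; rfl
  have g2 : PySem.List.pyGetD (x :: t) (i + 1 - 1) 0 = PySem.List.pyGetD t (i - 1) 0 := by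
    rw [PySem.List.pyGetD_of_nonneg _ _ (by omega), PySem.List.pyGetD_of_nonneg _ _ (by omega)]
    have : (i + 1 - 1).toNat = (i - 1).toNat + 1 := by omega
    rw [this]; rfl
  have s1 : (i + 1).toNat = i.toNat + 1 := by omega
  have s2 : (i + 1 - 1).toNat = (i - 1).toNat + 1 := by omega
  unfold lamtronStep
  rw [g1, g2, s1, s2]
  split_ifs <;> simp [List.set]

theorem pv_step_one (x y : Int) (r : List Int) :
    lamtronStep (x :: y :: r) 1 = (x + (if y ≥ 5 then 1 else 0)) :: 0 :: r := by
  unfold lamtronStep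
  simp [PySem.List.pyGetD_of_nonneg]
  split_ifs <;> simp [List.set]

theorem pv_fold_shift (r : List Int) (hr : ∀ i ∈ r, 1 ≤ i) (x : Int) (t : List Int) :
    (r.map (· + 1)).foldl lamtronStep (x :: t) = x :: r.foldl lamtronStep t := by
  induction r generalizing t with
  | nil => rfl
  | cons i r ih =>
    simp only [List.map_cons, List.foldl_cons]
    rw [pv_step_shift x t i (hr i (by simp)), ih (fun j hj => hr j (by simp [hj]))]

theorem pv_loop (l : List Int) (x : Int) :
    (PySem.List.pyRange (l.length : Int) 0 (-1)).foldl lamtronStep (x :: l)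
      = (x + pvCarry l) :: List.replicate l.length 0 := by
  induction l generalizing x with
  | nil =>
    simp [PySem.List.pyRange_neg_one_eq_nil, pvCarry]
  | cons y l ih =>
    rw [show ((y :: l).length : Int) = ((l.length + 1 : ℕ) : Int) by simp]
    rw [pv_range_split (l.length + 1) (by omega), List.foldl_append,
        pv_range_shift (l.length + 1),
        show (((l.length + 1 : ℕ) : Int)) - 1 = ((l.length : ℕ) : Int) by push_cast; ring]
    rw [pv_fold_shift _ (fun i hi => by
          rw [PySem.List.mem_pyRange_neg_one] at hi; omega) x (y :: l)]
    rw [ih y]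
    simp only [List.foldl_cons, List.foldl_nil]
    rw [pv_step_one]
    have : (if y + pvCarry l ≥ 5 then (1:Int) else 0) = pvCarry (y :: l) := by
      simp [pvCarry]
    rw [this]
    simp [List.replicate_succ]

theorem pv_str_fold (k : ℕ) (acc : String) :
    (List.replicate k (0 : Int)).foldl (fun acc x => acc ++ PySem.Int.toStr x) acc
      = acc ++ String.ofList (List.replicate k '0') := by
  induction k generalizing acc with
  | zero => simp
  | succ k ih =>
    rw [List.replicate_succ, List.foldl_cons, ih, List.replicate_succ]
    apply String.toList_inj.mp
    have h0 : PySem.Int.toChars 0 = ['0'] := by decide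
    simp [h0]

-- ===== VERDICT (by name: the statement is the Claim_ definition above) =====
theorem lamtron_spec : Claim_equal_lamtron := by
  intro s _hdom hpre
  unfold Spec_lamtron lamtron lamtron_alt
  unfold Pre_lamtron at hpre
  rw [PySem.Str.len_eq] at hpre
  simp only [String.length_toList] at hpre
  simp only [PySem.Str.len_eq, String.length_toList]
  by_cases h1 : (s.length : Int) = 1
  · rw [if_pos h1, if_pos h1]
  · rw [if_neg h1, if_neg h1]
    have hlen2 : 2 ≤ s.length := by
      rcases hpre with h | h
      · exact absurd h h1
      · have := h.1; omega
    have hdig : ∀ c ∈ s.toList, PySem.Chars.isdigit c = true := by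
      rcases hpre with h | h
      · exact absurd h h1
      · exact fun c hc => List.all_eq_true.mp h.2 c hc
    obtain ⟨c0, cs, hs⟩ : ∃ c0 cs, s.toList = c0 :: cs := by
      cases hsl : s.toList with
      | nil =>
        exfalso
        have := congrArg List.length hsl
        simp only [List.length_nil, String.length_toList] at this
        omega
      | cons a b => exact ⟨a, b, rfl⟩
    have hdl : s.length = cs.length + 1 := by
      have := congrArg List.length hs
      simpa using this
    rw [hs]
    simp only [List.map_cons]
    rw [show ((pvDigit c0 :: cs.map pvDigit).length : Int) - 1 = ((cs.map pvDigit).length : Int) by simp]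
    rw [show ((cs.map pvDigit).length : Int) = (((cs.map pvDigit).length : ℕ) : Int) from rfl]
    rw [pv_loop (cs.map pvDigit) (pvDigit c0)]
    rw [PySem.List.slice_from_one]
    simp only [List.tail_cons, List.headD_cons]
    rw [pv_char_carry cs (fun c hc => hdig c (by simp [hs, hc]))]
    have hg0 : PySem.List.pyGetD ((pvDigit c0 + pvCarry (cs.map pvDigit)) :: List.replicate (cs.map pvDigit).length 0) 0 0
        = pvDigit c0 + pvCarry (cs.map pvDigit) := by
      rw [PySem.List.pyGetD_of_nonneg _ _ (by omega)]; rfl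
    rw [hg0]
    by_cases h10 : pvDigit c0 + pvCarry (cs.map pvDigit) = 10
    · rw [if_pos h10, if_pos h10, List.set_cons_zero]
      rw [List.foldl_cons, List.foldl_cons, pv_str_fold]
      apply String.toList_inj.mp
      have ha : PySem.Int.toChars 1 = ['1'] := by decide
      have hb : PySem.Int.toChars 0 = ['0'] := by decide
      simp [PySem.Int.toList_toStr, ha, hb, hdl, List.replicate_succ]
    · rw [if_neg h10, if_neg h10]
      rw [List.foldl_cons, pv_str_fold]
      apply String.toList_inj.mp
      simp [hdl]
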